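-- pv_equiv track=rewrite | github.com/amir9979/diagnose_vulnerabilities | FOE2/certfuzz/fuzztools/hamming.py | vector_compare
-- ===== SOURCE A (Python) =====
-- def vector_compare(v1, v2):
--     '''
--     Given two sparse vectors (lists of indices whose value is 1), return the distance between them
--     '''
--     vdict = {}
--
--     for v in v1, v2:
--         for idx in v:
--             if vdict.get(idx):
--                 vdict[idx] += 1
--             else:
--                 vdict[idx] = 1
--
--     distance = 0
--     for val in vdict.values():
--         if val == 1:
--             distance += 1
--
--     return distance
-- ===== SOURCE B (Python) =====
-- def vector_compare(v1, v2):
--     '''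
--     Given two sparse vectors (lists of indices whose value is 1), return the distance between them
--     '''
--     xs = sorted(v1 + v2)
--     n = len(xs)
--     distance = 0
--     i = 0
--     while i < n:
--         x = xs[i]
--         j = i + 1
--         while j < n and xs[j] == x:
--             j += 1
--         if j - i == 1:
--             distance += 1
--         i = j
--     return distance
-- ===== Notes on version B (the rewrite author's own statement) =====
-- stated objective: alternative
-- what changed: Replaces A's dict-based occurrence counting with sort-then-scan: concatenate, sort, and count runs of length exactly 1 in one linear pass over the sorted list.
import Mathlib
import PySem

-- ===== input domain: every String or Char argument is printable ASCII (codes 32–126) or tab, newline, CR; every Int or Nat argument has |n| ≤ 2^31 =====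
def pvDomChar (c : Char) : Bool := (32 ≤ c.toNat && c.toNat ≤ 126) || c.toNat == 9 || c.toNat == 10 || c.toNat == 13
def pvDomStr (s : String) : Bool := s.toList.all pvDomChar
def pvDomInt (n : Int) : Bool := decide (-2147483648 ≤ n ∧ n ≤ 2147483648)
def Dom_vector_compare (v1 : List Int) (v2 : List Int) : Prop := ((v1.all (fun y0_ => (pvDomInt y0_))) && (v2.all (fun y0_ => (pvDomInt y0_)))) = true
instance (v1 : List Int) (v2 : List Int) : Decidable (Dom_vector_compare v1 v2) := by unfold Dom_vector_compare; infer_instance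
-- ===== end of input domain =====

-- B replaces A's dict-counting with sort-then-scan (count runs of length exactly 1); objective: alternative algorithm.

-- ===== PORT A =====
-- literal port of A: build a dict of occurrence counts over v1 then v2, then count values equal to 1
def vector_compare (v1 : List Int) (v2 : List Int) : Int :=
  let vdict : PySem.Dict Int Int :=
    [v1, v2].foldl (fun d v =>
      v.foldl (fun d idx =>
        match d.get? idx with
        | some c => if c ≠ 0 then d.insert idx (c + 1) else d.insert idx 1
        | none => d.insert idx 1) d) PySem.Dict.empty
  vdict.values.foldl (fun distance val => if val == 1 then distance + 1 else distance) 0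

-- ===== PORT B =====
-- the outer/inner while loops of Source B: consume one run of equal elements per step
def pvScanRuns : List Int → Int
  | [] => 0
  | x :: rest =>
    let run := rest.takeWhile (fun y => y == x)
    (if run.isEmpty then (1 : Int) else 0) + pvScanRuns (rest.drop run.length)
termination_by s => s.length
decreasing_by
  simp only [List.length_drop, List.length_cons]
  omega

def vector_compare_alt (v1 : List Int) (v2 : List Int) : Int :=
  pvScanRuns (PySem.List.sorted (v1 ++ v2) (fun x => x))

-- ===== PRECONDITION & SPEC =====
def Spec_vector_compare (v1 : List Int) (v2 : List Int) (out : Int) : Prop := out = vector_compare_alt v1 v2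
instance (v1 : List Int) (v2 : List Int) (out : Int) : Decidable (Spec_vector_compare v1 v2 out) := by unfold Spec_vector_compare; infer_instance

-- ===== CLAIM (what is proved, stated in full; the proofs are below) =====
def Claim_equal_vector_compare : Prop := ∀ (v1 : List Int) (v2 : List Int), Dom_vector_compare v1 v2 → Spec_vector_compare v1 v2 (vector_compare v1 v2)

-- ===== LEMMAS AND PROOFS =====

-- the common value both sides compute: number of elements of l occurring exactly once
def pvSingles (l : List Int) : Nat := l.countP (fun x => decide (l.count x = 1))

-- distinct-vs-raw counting agree when the predicate forces count 1
theorem pvSet_countP (l : List Int) (p : Int → Bool) (hp : ∀ x, p x = true → l.count x = 1) :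
    ((PySem.Set.ofList l).countP p) = l.countP p := by
  rw [List.countP_eq_length_filter, List.countP_eq_length_filter]
  have h1 : ((PySem.Set.ofList l).filter p).Nodup := (PySem.Set.nodup_ofList l).filter p
  have h2 : (l.filter p).Nodup := by
    rw [List.nodup_iff_count_le_one]
    intro a
    by_cases hpa : p a = true
    · rw [List.count_filter hpa, hp a hpa]
    · have : a ∉ l.filter p := by simp [List.mem_filter, hpa]
      rw [List.count_eq_zero_of_not_mem this]
      omega
  have hmem : ∀ x, x ∈ (PySem.Set.ofList l).filter p ↔ x ∈ l.filter p := by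
    intro x
    simp [List.mem_filter, PySem.Set.mem_ofList]
  rw [← List.toFinset_card_of_nodup h1, ← List.toFinset_card_of_nodup h2]
  congr 1
  ext x
  simp only [List.mem_toFinset]
  exact hmem x

-- A's update step is extensionally the standard counting step
theorem pvStepA_eq (d : PySem.Dict Int Int) (idx : Int) :
    (match d.get? idx with
      | some c => if c ≠ 0 then d.insert idx (c + 1) else d.insert idx 1
      | none => d.insert idx 1) = d.insert idx (d.getD idx 0 + 1) := by
  rcases h : d.get? idx with _ | c
  · simp [PySem.Dict.getD_eq_get?_getD, h]
  · simp only [PySem.Dict.getD_eq_get?_getD, h, Option.getD_some]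
    by_cases hc : c = 0 <;> simp [hc]

theorem pvA_eq_singles (v1 v2 : List Int) :
    vector_compare v1 v2 = (pvSingles (v1 ++ v2) : Int) := by
  unfold vector_compare
  have hstep : (fun (d : PySem.Dict Int Int) idx =>
      (match d.get? idx with
        | some c => if c ≠ 0 then d.insert idx (c + 1) else d.insert idx 1
        | none => d.insert idx 1)) = fun d idx => d.insert idx (d.getD idx 0 + 1) := by
    funext d idx; exact pvStepA_eq d idx
  simp only [hstep, List.foldl_cons, List.foldl_nil]
  rw [← List.foldl_append]
  set l := v1 ++ v2 with hl
  have hvals : (l.foldl (fun (d : PySem.Dict Int Int) idx => d.insert idx (d.getD idx 0 + 1)) PySem.Dict.empty).values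
      = (PySem.Set.ofList l).map (fun k => (l.count k : Int)) := by
    rw [PySem.Dict.values_eq_map_keys _ (PySem.Dict.nodup_keys_foldl_insert l _ _ PySem.Dict.nodup_keys_empty) 0]
    rw [PySem.Dict.keys_foldl_insert]
    simp [PySem.Dict.getD_foldl_insert_add_one]
    rw [PySem.Set.ofList_eq_foldl]; rfl
  rw [hvals, PySem.List.foldl_beq_add_one]
  rw [List.count_eq_countP, List.countP_map]
  rw [zero_add]
  unfold pvSingles
  congr 1
  rw [← pvSet_countP l _ (by intro x hx; simpa using hx)]
  apply List.countP_congr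
  intro x _
  by_cases h : l.count x = 1 <;> simp [h]

-- sorted-run scan counts the elements of multiplicity 1
theorem pvScanRuns_sorted (s : List Int) (hs : s.Pairwise (· ≤ ·)) :
    pvScanRuns s = (s.countP (fun x => decide (s.count x = 1)) : Int) := by
  induction s using pvScanRuns.induct with
  | case1 => simp [pvScanRuns]
  | case2 x rest run ih =>
    have hrun : run = rest.takeWhile (fun y => y == x) := rfl
    set tail := rest.dropWhile (fun y => y == x) with htaildef
    have hdecomp : rest = run ++ tail := (List.takeWhile_append_dropWhile).symm
    have hdrop : rest.drop run.length = tail := by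
      conv_lhs => rw [hdecomp]
      exact List.drop_left
    -- every element of run is x
    have hrunx : ∀ y ∈ run, y = x := by
      intro y hy
      have := List.mem_takeWhile_imp (hrun ▸ hy)
      simpa using this
    -- every element of tail exceeds x
    have hxtail : ∀ y ∈ tail, x < y := by
      rcases htail : tail with _ | ⟨y, t⟩
      · simp
      · have hyx : (fun y => y == x) y = false := by
          have := List.head_dropWhile_not (l := rest) (fun y => y == x) (by simp [← htaildef, htail])
          have hy : (rest.dropWhile (fun y => y == x)).head (by simp [← htaildef, htail]) = y := by
            simp [← htaildef, htail]
          rwa [hy] at this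
        have hyne : y ≠ x := by simpa using hyx
        have hymem : y ∈ rest := by
          rw [hdecomp, htail]; simp
        have hxy : x ≤ y := (List.pairwise_cons.1 hs).1 y hymem
        have hxy' : x < y := lt_of_le_of_ne hxy (Ne.symm hyne)
        have htp : (y :: t).Pairwise (· ≤ ·) := by
          have : tail.Sublist rest := htaildef ▸ List.dropWhile_sublist _
          have h2 := ((List.pairwise_cons.1 hs).2).sublist this
          rwa [htail] at h2
        intro z hz
        rcases List.mem_cons.1 hz with rfl | hzt
        · exact hxy'
        · exact lt_of_lt_of_le hxy' ((List.pairwise_cons.1 htp).1 z hzt)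
    have hxnot : x ∉ tail := fun h => lt_irrefl x (hxtail x h)
    have htailpw : tail.Pairwise (· ≤ ·) :=
      ((List.pairwise_cons.1 hs).2).sublist (htaildef ▸ List.dropWhile_sublist _)
    have hcx : (x :: rest).count x = 1 + run.length := by
      rw [hdecomp]
      simp only [List.count_cons_self, List.count_append]
      rw [List.count_eq_zero.2 hxnot]
      have : run.count x = run.length := by
        rw [List.count_eq_length]; intro b hb; exact (hrunx b hb).symm
      omega
    -- counts of tail elements in the whole list are their counts in tail
    have hcy : ∀ y ∈ tail, (x :: rest).count y = tail.count y := by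
      intro y hy
      have hyne : y ≠ x := fun h => lt_irrefl x (h ▸ hxtail y hy)
      rw [hdecomp, show x :: (run ++ tail) = (x :: run) ++ tail from rfl, List.count_append,
        List.count_eq_zero.2 (show y ∉ x :: run by
          intro hmem
          rcases List.mem_cons.1 hmem with rfl | hr
          · exact hyne rfl
          · exact hyne (hrunx y hr))]
      omega
    set p := fun z => decide (List.count z (x :: rest) = 1) with hpdef
    have hL : x :: rest = (x :: run) ++ tail := by simp [hdecomp]
    have hsplit : (x :: rest).countP p = (x :: run).countP p + tail.countP p := by
      conv_lhs => rw [hL]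
      rw [List.countP_append]
    have htailcount : tail.countP p = tail.countP (fun z => decide (tail.count z = 1)) := by
      apply List.countP_congr
      intro z hz
      simp only [hpdef]
      rw [hcy z hz]
    have hhead : (x :: run).countP p = if run.isEmpty then 1 else 0 := by
      rcases hre : run with _ | ⟨r, rs⟩
      · have h1 : (x :: rest).count x = 1 := by rw [hcx, hre]; simp
        simp [hpdef, h1]
      · have h1 : (x :: rest).count x = 1 + (r :: rs).length := by rw [hcx, hre]
        have hpfalse : p x = false := by
          simp only [hpdef, h1, List.length_cons]
          simp
        rw [if_neg (by simp)]
        apply List.countP_eq_zero.2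
        intro z hz
        have hzx : z = x := by
          rcases List.mem_cons.1 hz with rfl | hr
          · rfl
          · exact hrunx z (hre ▸ hr)
        rw [hzx]
        simp [hpfalse]
    rw [pvScanRuns]
    rw [← hrun]
    rw [hdrop]
    rw [hdrop] at ih
    rw [ih htailpw]
    rw [hsplit, htailcount, hhead]
    by_cases he : run.isEmpty <;> simp only [he, if_true] <;> push_cast <;> ring

theorem pvB_eq_singles (v1 v2 : List Int) :
    vector_compare_alt v1 v2 = (pvSingles (v1 ++ v2) : Int) := by
  unfold vector_compare_alt pvSingles
  set l := v1 ++ v2 with hl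
  have hpw : (PySem.List.sorted l (fun x => x) false).Pairwise (· ≤ ·) := by
    have := PySem.List.sorted_pairwise (xs := l) (key := fun x => x)
    simpa using this
  have hperm : (PySem.List.sorted l (fun x => x) false).Perm l := PySem.List.sorted_perm _ _ _
  rw [pvScanRuns_sorted _ hpw]
  congr 1
  have hcnt : ∀ z ∈ PySem.List.sorted l (fun x => x) false,
      decide (List.count z (PySem.List.sorted l (fun x => x) false) = 1) = true
        ↔ decide (List.count z l = 1) = true := by
    intro z hz
    rw [hperm.count_eq z]
  rw [List.countP_congr hcnt]
  exact hperm.countP_eq _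

-- ===== VERDICT (by name: the statement is the Claim_ definition above) =====
theorem vector_compare_spec : Claim_equal_vector_compare := by
  intro v1 v2 _
  unfold Spec_vector_compare
  rw [pvA_eq_singles, pvB_eq_singles]
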